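-- pv_equiv track=rewrite | github.com/Nutlope/algorithms | Meetings/trung_1-14-21.py | hungry_students
-- ===== SOURCE A (Python) =====
-- import collections
--
-- def hungry_students(students, sandwiches):
--   std = [students.count(0), students.count(1)]
--
--   students = collections.deque(students)
--   sandwiches = collections.deque(sandwiches)
--
--   while students:
--     if students[0] == sandwiches[0]:
--       std[students.popleft()] -= 1
--       sandwiches.popleft()
--     else:
--       if 0 in std:
--         return len(students)
--       students.rotate(-1)
--   return len(students)
-- ===== SOURCE B (Python) =====
-- import collections
--
-- def hungry_students(students, sandwiches):
--     counts = collections.Counter(students)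
--     remaining = len(students)
--     for s in sandwiches:
--         if counts[s] == 0:
--             break
--         counts[s] -= 1
--         remaining -= 1
--     return remaining
-- ===== Notes on version B (the rewrite author's own statement) =====
-- stated objective: simpler
-- what changed: Replaces A's deque simulation with repeated rotations by a Counter of preferences and a single pass over the sandwich stack that stops at the first sandwich whose preference count is exhausted.
-- outside the precondition, e.g. on hungry_students([5, 2], [2, 5]): A returns 2, B returns 0; on hungry_students([2, 0], [0, 2]): A returns 2, B returns 0
import Mathlib
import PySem

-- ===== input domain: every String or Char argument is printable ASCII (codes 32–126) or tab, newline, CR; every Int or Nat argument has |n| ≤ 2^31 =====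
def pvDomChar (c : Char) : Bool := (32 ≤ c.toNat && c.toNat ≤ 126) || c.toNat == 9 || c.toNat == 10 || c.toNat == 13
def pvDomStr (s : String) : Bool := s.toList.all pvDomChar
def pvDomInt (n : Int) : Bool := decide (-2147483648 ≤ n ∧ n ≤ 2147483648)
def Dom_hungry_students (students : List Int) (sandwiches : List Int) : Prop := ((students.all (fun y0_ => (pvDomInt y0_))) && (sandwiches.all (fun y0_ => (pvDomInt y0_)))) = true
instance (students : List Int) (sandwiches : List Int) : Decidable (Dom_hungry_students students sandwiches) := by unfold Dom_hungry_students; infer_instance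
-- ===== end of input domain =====

-- B replaces A's rotating-deque simulation by a Counter and a single pass over the sandwich stack (simpler).

-- ===== PORT A =====
-- A's while-loop over the two deques; state: students queue, sandwiches queue, std = (count of 0s, count of 1s).
-- The fuel argument only makes the recursion total: on inputs satisfying Pre_ it is never exhausted
-- (each match removes a student, and between matches at most length-1 rotations occur).
def pvLoopA : Nat → List Int → List Int → Int → Int → Int
  | 0, students, _, _, _ => (students.length : Int)          -- fuel guard, unreachable under Pre_
  | _ + 1, [], _, _, _ => 0                                  -- while students: exits, return len(students)
  | fuel + 1, s :: ss, sandwiches, c0, c1 =>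
    match sandwiches with
    | [] => ((s :: ss).length : Int)                          -- Python raises IndexError here; excluded by Pre_
    | w :: ws =>
      if s = w then
        -- std[students.popleft()] -= 1; sandwiches.popleft().  For s ∉ {0,1} Python raises or
        -- wraps a negative index; such inputs are excluded by Pre_.
        if s = 0 then pvLoopA fuel ss ws (c0 - 1) c1
        else pvLoopA fuel ss ws c0 (c1 - 1)
      else if c0 = 0 ∨ c1 = 0 then ((s :: ss).length : Int)   -- if 0 in std: return len(students)
      else pvLoopA fuel (ss ++ [s]) (w :: ws) c0 c1           -- students.rotate(-1)

def hungry_students (students : List Int) (sandwiches : List Int) : Int :=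
  pvLoopA (students.length * students.length + students.length + 1) students sandwiches
    ((PySem.List.count students 0 : Nat) : Int) ((PySem.List.count students 1 : Nat) : Int)

-- ===== PORT B =====
-- B's single pass over sandwiches; counts = collections.Counter(students), remaining = len(students)
def pvLoopB : List Int → PySem.Dict Int Int → Int → Int
  | [], _, rem => rem
  | w :: ws, counts, rem =>
    if counts.getD w 0 = 0 then rem                            -- break
    else pvLoopB ws (counts.insert w (counts.getD w 0 - 1)) (rem - 1)

def hungry_students_alt (students : List Int) (sandwiches : List Int) : Int :=
  pvLoopB sandwiches (PySem.Dict.counter students) (students.length : Int)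

-- ===== PRECONDITION & SPEC =====
-- Pre_ restricts to the problem's natural binary domain — both lists hold only the two sandwich
-- types 0 and 1 (on other values A raises IndexError via std[student], wraps a negative list
-- index, or rotates forever, since its '0 in std' test only sees the 0/1 counts) — minus exactly
-- the inputs where A raises IndexError because the sandwich queue empties while students remain
-- (every sandwich gets served yet fewer sandwiches than students); plus the inputs where both
-- programs trivially stop at once: no students at all, or a front sandwich nobody wants while one
-- of A's two counters is already zero.
def Pre_hungry_students (students : List Int) (sandwiches : List Int) : Prop :=
  ((∀ x ∈ students, x = 0 ∨ x = 1) ∧ (∀ x ∈ sandwiches, x = 0 ∨ x = 1) ∧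
    ¬ (sandwiches.count 0 ≤ students.count 0 ∧ sandwiches.count 1 ≤ students.count 1 ∧
       sandwiches.length < students.length))
  ∨ students = []
  ∨ ((0 ∉ students ∨ 1 ∉ students) ∧ sandwiches ≠ [] ∧ ∀ w ∈ sandwiches.take 1, w ∉ students)
instance (students : List Int) (sandwiches : List Int) : Decidable (Pre_hungry_students students sandwiches) := by
  unfold Pre_hungry_students; infer_instance

def pvWitness_hungry_students : List Int × List Int := ([0, 1, 0], [1, 0, 0])

def Spec_hungry_students (students : List Int) (sandwiches : List Int) (out : Int) : Prop := out = hungry_students_alt students sandwiches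
instance (students : List Int) (sandwiches : List Int) (out : Int) : Decidable (Spec_hungry_students students sandwiches out) := by unfold Spec_hungry_students; infer_instance

-- ===== CLAIM (what is proved, stated in full; the proofs are below) =====
def Claim_equal_hungry_students : Prop := ∀ (students : List Int) (sandwiches : List Int), Dom_hungry_students students sandwiches → Pre_hungry_students students sandwiches → Spec_hungry_students students sandwiches (hungry_students students sandwiches)

-- ===== LEMMAS AND PROOFS =====

-- split a list at the FIRST occurrence of w
theorem pv_split_first {w : Int} : ∀ {l : List Int}, w ∈ l → ∃ u v, l = u ++ w :: v ∧ w ∉ u := by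
  intro l hl
  induction l with
  | nil => cases hl
  | cons x xs ih =>
    by_cases hx : x = w
    · exact ⟨[], xs, by simp [hx], by simp⟩
    · have hmem : w ∈ xs := by
        rcases List.mem_cons.mp hl with h | h
        · exact absurd h.symm hx
        · exact h
      rcases ih hmem with ⟨u, v, huv, hw⟩
      refine ⟨x :: u, v, by simp [huv], ?_⟩
      simp only [List.mem_cons, not_or]
      exact ⟨fun h => hx h.symm, hw⟩

-- unfolding lemmas for the two loops
theorem pvLoopA_match (f : Nat) (ss ws : List Int) (c0 c1 s : Int) :
    pvLoopA (f + 1) (s :: ss) (s :: ws) c0 c1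
      = if s = 0 then pvLoopA f ss ws (c0 - 1) c1 else pvLoopA f ss ws c0 (c1 - 1) := by
  simp [pvLoopA]

theorem pvLoopA_mismatch (f : Nat) (ss ws : List Int) (c0 c1 s w : Int) (hsw : s ≠ w) :
    pvLoopA (f + 1) (s :: ss) (w :: ws) c0 c1
      = if c0 = 0 ∨ c1 = 0 then ((s :: ss).length : Int)
        else pvLoopA f (ss ++ [s]) (w :: ws) c0 c1 := by
  simp [pvLoopA, hsw]

theorem pvLoopB_cons (ws : List Int) (d : PySem.Dict Int Int) (rem w : Int) :
    pvLoopB (w :: ws) d rem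
      = if d.getD w 0 = 0 then rem
        else pvLoopB ws (d.insert w (d.getD w 0 - 1)) (rem - 1) := rfl

-- rotation phase: while the head student differs from the front sandwich and neither count is
-- zero, A just rotates; u is the prefix of students not wanting w
theorem pv_rotate (w : Int) (ws : List Int) (c0 c1 : Int) (h0 : c0 ≠ 0) (h1 : c1 ≠ 0) :
    ∀ (u : List Int) (v : List Int) (fuel : Nat), (∀ x ∈ u, x ≠ w) → u.length ≤ fuel →
    pvLoopA fuel (u ++ v) (w :: ws) c0 c1 = pvLoopA (fuel - u.length) (v ++ u) (w :: ws) c0 c1 := by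
  intro u
  induction u with
  | nil => intro v fuel _ _; simp
  | cons x u' ih =>
    intro v fuel hne hf
    obtain ⟨f, rfl⟩ : ∃ f, fuel = f + 1 := ⟨fuel - 1, by simp at hf; omega⟩
    have hx : x ≠ w := hne x (by simp)
    show pvLoopA (f + 1) (x :: (u' ++ v)) (w :: ws) c0 c1 = _
    rw [show (x :: (u' ++ v)) = (x :: u') ++ v by simp] at *
    rw [show ((x :: u') ++ v) = x :: (u' ++ v) by simp]
    rw [pvLoopA_mismatch f (u' ++ v) ws c0 c1 x w hx,
        if_neg (not_or.mpr ⟨h0, h1⟩), List.append_assoc,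
        ih (v ++ [x]) f (fun y hy => hne y (by simp [hy])) (by simp at hf ⊢; omega)]
    simp [List.append_assoc]

-- main invariant on the natural binary domain minus A's IndexError region: A's simulation with
-- correct counts computes B's single scan, for any counts dict agreeing with the remaining students
theorem pv_main : ∀ (n : Nat) (students ws : List Int) (fuel : Nat) (d : PySem.Dict Int Int),
    students.length = n →
    (∀ x ∈ students, x = 0 ∨ x = 1) → (∀ x ∈ ws, x = 0 ∨ x = 1) →
    ¬ (ws.count 0 ≤ students.count 0 ∧ ws.count 1 ≤ students.count 1 ∧
       ws.length < students.length) →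
    n * n + n + 1 ≤ fuel →
    d.getD 0 0 = ((students.count 0 : Nat) : Int) →
    d.getD 1 0 = ((students.count 1 : Nat) : Int) →
    pvLoopA fuel students ws ((students.count 0 : Nat) : Int) ((students.count 1 : Nat) : Int)
      = pvLoopB ws d (n : Int) := by
  intro n
  induction n with
  | zero =>
    intro students ws fuel d hlen _ hwsb _ hf hd0 hd1
    have hst : students = [] := List.eq_nil_of_length_eq_zero hlen
    obtain ⟨f, rfl⟩ : ∃ f, fuel = f + 1 := ⟨fuel - 1, by omega⟩
    subst hst
    simp only [List.count_nil, Nat.cast_zero] at hd0 hd1 ⊢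
    cases ws with
    | nil => simp [pvLoopA, pvLoopB]
    | cons w ws' =>
      rw [pvLoopB_cons]
      have hw0 : d.getD w 0 = 0 := by
        rcases hwsb w (by simp) with rfl | rfl
        · exact hd0
        · exact hd1
      rw [if_pos hw0]
      simp [pvLoopA]
  | succ m ih =>
    intro students ws fuel d hlen hstb hwsb hns hf hd0 hd1
    obtain ⟨s, ss, rfl⟩ : ∃ s ss, students = s :: ss := by
      cases students with
      | nil => simp at hlen
      | cons a l => exact ⟨a, l, rfl⟩
    obtain ⟨w, ws', rfl⟩ : ∃ w t, ws = w :: t := by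
      cases ws with
      | nil =>
        exfalso
        exact hns ⟨by simp, by simp, by simp⟩
      | cons a l => exact ⟨a, l, rfl⟩
    obtain ⟨f, rfl⟩ : ∃ f, fuel = f + 1 := ⟨fuel - 1, by omega⟩
    have hs : s = 0 ∨ s = 1 := hstb s (by simp)
    have hw : w = 0 ∨ w = 1 := hwsb w (by simp)
    have hlen' : ss.length = m := by simpa using hlen
    have hstb' : ∀ x ∈ ss, x = 0 ∨ x = 1 := fun x hx => hstb x (by simp [hx])
    have hwsb' : ∀ x ∈ ws', x = 0 ∨ x = 1 := fun x hx => hwsb x (by simp [hx])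
    have hfm : m * m + m + 1 ≤ f := by nlinarith
    have hcast : ((m + 1 : Nat) : Int) - 1 = (m : Int) := by push_cast; ring
    by_cases hsw : s = w
    · -- match at the head
      subst hsw
      rcases hs with rfl | rfl
      · have hns' : ¬ (ws'.count 0 ≤ ss.count 0 ∧ ws'.count 1 ≤ ss.count 1 ∧
            ws'.length < ss.length) := by
          intro ⟨h0, h1, h2⟩
          refine hns ⟨?_, ?_, ?_⟩ <;> simp <;> omega
        rw [show (((0 :: ss).count 0 : Nat) : Int) = ((ss.count 0 : Nat) : Int) + 1 by simp] at hd0 ⊢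
        rw [show (((0 :: ss).count 1 : Nat) : Int) = ((ss.count 1 : Nat) : Int) by simp] at hd1 ⊢
        rw [pvLoopA_match, if_pos rfl, add_sub_cancel_right]
        rw [pvLoopB_cons, hd0,
            if_neg (by positivity : ¬ (((ss.count 0 : Nat) : Int) + 1 = 0)),
            add_sub_cancel_right, hcast]
        refine ih ss ws' f _ hlen' hstb' hwsb' hns' hfm ?_ ?_
        · rw [PySem.Dict.getD_insert_self]
        · rw [PySem.Dict.getD_insert, if_neg (by norm_num : ¬ ((1 : Int) = 0)), hd1]
      · have hns' : ¬ (ws'.count 0 ≤ ss.count 0 ∧ ws'.count 1 ≤ ss.count 1 ∧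
            ws'.length < ss.length) := by
          intro ⟨h0, h1, h2⟩
          refine hns ⟨?_, ?_, ?_⟩ <;> simp <;> omega
        rw [show (((1 :: ss).count 0 : Nat) : Int) = ((ss.count 0 : Nat) : Int) by simp] at hd0 ⊢
        rw [show (((1 :: ss).count 1 : Nat) : Int) = ((ss.count 1 : Nat) : Int) + 1 by simp] at hd1 ⊢
        rw [pvLoopA_match, if_neg (by norm_num : ¬ ((1 : Int) = 0)), add_sub_cancel_right]
        rw [pvLoopB_cons, hd1,
            if_neg (by positivity : ¬ (((ss.count 1 : Nat) : Int) + 1 = 0)),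
            add_sub_cancel_right, hcast]
        refine ih ss ws' f _ hlen' hstb' hwsb' hns' hfm ?_ ?_
        · rw [PySem.Dict.getD_insert, if_neg (by norm_num : ¬ ((0 : Int) = 1)), hd0]
        · rw [PySem.Dict.getD_insert_self]
    · -- mismatch at the head
      have hspos : (s :: ss).count s ≠ 0 :=
        Nat.pos_iff_ne_zero.mp (List.count_pos_iff.mpr (by simp))
      by_cases hcw : (s :: ss).count w = 0
      · -- nobody wants w: A returns len(students), B breaks
        rw [pvLoopA_mismatch _ _ _ _ _ _ _ hsw, pvLoopB_cons]
        have hdw : d.getD w 0 = 0 := by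
          rcases hw with rfl | rfl
          · rw [hd0]; exact_mod_cast hcw
          · rw [hd1]; exact_mod_cast hcw
        rw [if_pos hdw]
        rcases hw with rfl | rfl
        · rw [if_pos (Or.inl (by exact_mod_cast hcw))]
          simp [hlen]
        · rw [if_pos (Or.inr (by exact_mod_cast hcw))]
          simp [hlen]
      · -- someone wants w: rotate until that student is at the front, then match
        have hmemw : w ∈ s :: ss := List.count_pos_iff.mp (Nat.pos_of_ne_zero hcw)
        have hc0 : (((s :: ss).count 0 : Nat) : Int) ≠ 0 := by
          rcases hs with rfl | rfl
          · exact_mod_cast hspos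
          · rcases hw with rfl | rfl
            · exact_mod_cast hcw
            · exact absurd rfl hsw
        have hc1 : (((s :: ss).count 1 : Nat) : Int) ≠ 0 := by
          rcases hs with rfl | rfl
          · rcases hw with rfl | rfl
            · exact absurd rfl hsw
            · exact_mod_cast hcw
          · exact_mod_cast hspos
        obtain ⟨u, v, huv, hwu⟩ := pv_split_first hmemw
        have hulen : u.length ≤ m := by
          have := congrArg List.length huv
          simp at this
          omega
        have e0 : List.count 0 (u ++ w :: v) = List.count 0 (s :: ss) := by rw [huv]
        have e1 : List.count 1 (u ++ w :: v) = List.count 1 (s :: ss) := by rw [huv]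
        rw [huv, e0, e1, pv_rotate w ws' _ _ hc0 hc1 u (w :: v) (f + 1)
          (fun x hx h => hwu (h ▸ hx)) (by omega)]
        obtain ⟨g, hg⟩ : ∃ g, f + 1 - u.length = g + 1 := ⟨f - u.length, by omega⟩
        rw [hg]
        have hcnt0 : (v ++ u).count 0 = if w = 0 then (s :: ss).count 0 - 1 else (s :: ss).count 0 := by
          rw [huv]
          simp [List.count_append, List.count_cons]
          split <;> simp <;> omega
        have hcnt1 : (v ++ u).count 1 = if w = 1 then (s :: ss).count 1 - 1 else (s :: ss).count 1 := by
          rw [huv]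
          simp [List.count_append, List.count_cons]
          split <;> simp <;> omega
        have hlenvu : (v ++ u).length = m := by
          have := congrArg List.length huv
          simp at this
          simp
          omega
        have hbinvu : ∀ x ∈ v ++ u, x = 0 ∨ x = 1 := by
          intro x hx
          apply hstb
          rw [huv]
          rcases List.mem_append.mp hx with h | h
          · simp [h]
          · simp [h]
        have hgf : m * m + m + 1 ≤ g := by
          have hsq : (m + 1) * (m + 1) = m * m + 2 * m + 1 := by ring
          omega
        show pvLoopA (g + 1) (w :: (v ++ u)) (w :: ws') _ _ = _
        rw [pvLoopA_match, pvLoopB_cons]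
        rcases hw with rfl | rfl
        · have hc0pos : 0 < (s :: ss).count 0 := Nat.pos_of_ne_zero (by exact_mod_cast hc0)
          have hv0 : (((v ++ u).count 0 : Nat) : Int) = (((s :: ss).count 0 : Nat) : Int) - 1 := by
            rw [hcnt0, if_pos rfl]; omega
          have hv1 : (((v ++ u).count 1 : Nat) : Int) = (((s :: ss).count 1 : Nat) : Int) := by
            rw [hcnt1, if_neg (by norm_num : ¬ ((0 : Int) = 1))]
          have hns'' : ¬ (ws'.count 0 ≤ (v ++ u).count 0 ∧ ws'.count 1 ≤ (v ++ u).count 1 ∧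
              ws'.length < (v ++ u).length) := by
            intro ⟨h0, h1, h2⟩
            rw [hcnt0, if_pos rfl] at h0
            rw [hcnt1, if_neg (by norm_num : ¬ ((0 : Int) = 1))] at h1
            rw [hlenvu] at h2
            have e1 : ((0 : Int) :: ws').count 0 = ws'.count 0 + 1 := by simp
            have e2 : ((0 : Int) :: ws').count 1 = ws'.count 1 := by simp
            have e3 : ((0 : Int) :: ws').length = ws'.length + 1 := rfl
            have e4 : (s :: ss).length = ss.length + 1 := rfl
            exact hns ⟨by omega, by omega, by omega⟩
          rw [if_pos rfl, if_neg (hd0 ▸ hc0), hd0, hcast, ← hv0, ← hv1]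
          refine ih (v ++ u) ws' g _ hlenvu hbinvu hwsb' hns'' hgf ?_ ?_
          · rw [PySem.Dict.getD_insert_self]
          · rw [PySem.Dict.getD_insert, if_neg (by norm_num : ¬ ((1 : Int) = 0)), hd1, hv1]
        · have hc1pos : 0 < (s :: ss).count 1 := Nat.pos_of_ne_zero (by exact_mod_cast hc1)
          have hv1 : (((v ++ u).count 1 : Nat) : Int) = (((s :: ss).count 1 : Nat) : Int) - 1 := by
            rw [hcnt1, if_pos rfl]; omega
          have hv0 : (((v ++ u).count 0 : Nat) : Int) = (((s :: ss).count 0 : Nat) : Int) := by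
            rw [hcnt0, if_neg (by norm_num : ¬ ((1 : Int) = 0))]
          have hns'' : ¬ (ws'.count 0 ≤ (v ++ u).count 0 ∧ ws'.count 1 ≤ (v ++ u).count 1 ∧
              ws'.length < (v ++ u).length) := by
            intro ⟨h0, h1, h2⟩
            rw [hcnt0, if_neg (by norm_num : ¬ ((1 : Int) = 0))] at h0
            rw [hcnt1, if_pos rfl] at h1
            rw [hlenvu] at h2
            have e1 : ((1 : Int) :: ws').count 0 = ws'.count 0 := by simp
            have e2 : ((1 : Int) :: ws').count 1 = ws'.count 1 + 1 := by simp
            have e3 : ((1 : Int) :: ws').length = ws'.length + 1 := rfl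
            have e4 : (s :: ss).length = ss.length + 1 := rfl
            exact hns ⟨by omega, by omega, by omega⟩
          rw [if_neg (by norm_num : ¬ ((1 : Int) = 0)), if_neg (hd1 ▸ hc1), hd1, hcast, ← hv1, ← hv0]
          refine ih (v ++ u) ws' g _ hlenvu hbinvu hwsb' hns'' hgf ?_ ?_
          · rw [PySem.Dict.getD_insert, if_neg (by norm_num : ¬ ((0 : Int) = 1)), hd0, hv0]
          · rw [PySem.Dict.getD_insert_self]

-- ===== VERDICT (by name: the statement is the Claim_ definition above) =====
theorem hungry_students_spec : Claim_equal_hungry_students := by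
  intro students sandwiches _ hpre
  show hungry_students students sandwiches = hungry_students_alt students sandwiches
  by_cases hemp : students = []
  · -- no students: A's while-loop never runs, B's first count is already exhausted
    subst hemp
    unfold hungry_students hungry_students_alt
    cases sandwiches with
    | nil => simp [pvLoopA, pvLoopB]
    | cons w ws' =>
      rw [pvLoopB_cons, if_pos (by rw [PySem.Dict.getD_counter]; simp)]
      simp [pvLoopA]
  · rcases hpre with ⟨hstb, hwsb, hns⟩ | rfl | ⟨hnm, hsne, htake⟩
    · -- natural binary domain minus A's IndexError region: the main invariant
      unfold hungry_students hungry_students_alt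
      rw [PySem.List.count_eq, PySem.List.count_eq]
      exact pv_main students.length students sandwiches _ _ rfl hstb hwsb hns le_rfl
        (by rw [PySem.Dict.getD_counter]) (by rw [PySem.Dict.getD_counter])
    · exact absurd rfl hemp
    · -- a front sandwich nobody wants, and one of A's counters is zero: both stop at once
      obtain ⟨s, ss, rfl⟩ : ∃ s ss, students = s :: ss := by
        cases students with
        | nil => exact absurd rfl hemp
        | cons a l => exact ⟨a, l, rfl⟩
      obtain ⟨w, ws', rfl⟩ : ∃ w t, sandwiches = w :: t := by
        cases sandwiches with
        | nil => exact absurd rfl hsne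
        | cons a l => exact ⟨a, l, rfl⟩
      have hwmem : w ∉ s :: ss := htake w (by simp)
      have hsw : s ≠ w := fun h => hwmem (by simp [h])
      have hcw : (s :: ss).count w = 0 := List.count_eq_zero.mpr hwmem
      unfold hungry_students hungry_students_alt
      rw [PySem.List.count_eq, PySem.List.count_eq]
      obtain ⟨f, hfeq⟩ : ∃ f, (s :: ss).length * (s :: ss).length + (s :: ss).length + 1 = f + 1 :=
        ⟨_, rfl⟩
      have hz : (((s :: ss).count 0 : Nat) : Int) = 0 ∨ (((s :: ss).count 1 : Nat) : Int) = 0 := by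
        rcases hnm with h | h
        · exact Or.inl (by exact_mod_cast List.count_eq_zero.mpr h)
        · exact Or.inr (by exact_mod_cast List.count_eq_zero.mpr h)
      rw [hfeq, pvLoopA_mismatch _ _ _ _ _ _ _ hsw, if_pos hz, pvLoopB_cons,
          if_pos (by rw [PySem.Dict.getD_counter]; exact_mod_cast hcw)]
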